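-- pv_equiv track=rewrite | github.com/Sinoosoida/PyCutBot | src/core/__init__.py | make_cuts
-- ===== SOURCE A (Python) =====
-- def make_cuts(frames):
--     cuts = []
--     place = 0
--     expect = None
--     for i in range(0, len(frames)):
--         if expect is None:
--             expect = frames[i]
--             place = i
--         else:
--             if (not expect) and frames[i]:
--                 expect = frames[i]
--                 place = i
--             if expect and (not frames[i]):
--                 cuts.append([place, i - 1])
--                 expect = frames[i]
--     if expect:
--         cuts.append([place, len(frames) - 1])
--     return cuts
-- ===== SOURCE B (Python) =====
-- def make_cuts(frames):
--     padded = [False] + [bool(x) for x in frames] + [False]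
--     edges = list(zip(padded, padded[1:]))
--     starts = [i for i, (prev, cur) in enumerate(edges) if cur and not prev]
--     ends = [i - 1 for i, (prev, cur) in enumerate(edges) if prev and not cur]
--     return [[s, e] for s, e in zip(starts, ends)]
-- ===== Notes on version B (the rewrite author's own statement) =====
-- stated objective: idiomatic
-- what changed: Replaced A's index-loop transition state machine (cuts/place/expect state) by padding the sequence with False on both ends, detecting rising and falling edges over adjacent pairs with two comprehensions, and zipping the edge lists into inclusive intervals.
import Mathlib
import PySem

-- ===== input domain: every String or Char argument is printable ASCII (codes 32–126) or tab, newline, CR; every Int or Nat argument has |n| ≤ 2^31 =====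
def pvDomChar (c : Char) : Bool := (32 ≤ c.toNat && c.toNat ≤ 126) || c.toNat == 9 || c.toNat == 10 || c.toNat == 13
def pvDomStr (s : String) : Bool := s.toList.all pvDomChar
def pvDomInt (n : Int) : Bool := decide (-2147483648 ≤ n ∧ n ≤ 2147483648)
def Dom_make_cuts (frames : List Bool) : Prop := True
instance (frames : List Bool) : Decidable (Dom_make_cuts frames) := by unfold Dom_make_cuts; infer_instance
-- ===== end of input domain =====

-- B replaces A's transition state machine by padded-edge detection (rising/falling edges zipped into intervals); objective: idiomatic, same O(n) cost.


-- ===== PORT A =====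
-- loop body of A: state (cuts, place, expect), index i, reads frames[i]
def mcStep (frames : List Bool) (st : List (List Int) × Int × Option Bool) (i : Int) :
    List (List Int) × Int × Option Bool :=
  let f := PySem.List.pyGetD frames i false
  match st.2.2 with
  | none => (st.1, i, some f)
  | some e =>
    let pe := if !e && f then (i, f) else (st.2.1, e)
    if pe.2 && !f then (st.1 ++ [[pe.1, i - 1]], pe.1, some f)
    else (st.1, pe.1, some pe.2)

def make_cuts (frames : List Bool) : List (List Int) :=
  let st := (PySem.List.pyRange 0 (frames.length : Int) 1).foldl (mcStep frames) ([], 0, none)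
  match st.2.2 with
  | some e => if e then st.1 ++ [[st.2.1, (frames.length : Int) - 1]] else st.1
  | none => st.1

-- ===== PORT B =====
def make_cuts_alt (frames : List Bool) : List (List Int) :=
  let padded := [false] ++ frames ++ [false]
  let edges := padded.zip (PySem.List.slice padded (some 1) none)
  let starts := (PySem.List.enumerate edges 0).filterMap
    (fun p => if p.2.2 && !p.2.1 then some p.1 else none)
  let ends := (PySem.List.enumerate edges 0).filterMap
    (fun p => if p.2.1 && !p.2.2 then some (p.1 - 1) else none)
  (starts.zip ends).map (fun p => [p.1, p.2])

-- ===== PRECONDITION & SPEC =====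
def Spec_make_cuts (frames : List Bool) (out : List (List Int)) : Prop := out = make_cuts_alt frames
instance (frames : List Bool) (out : List (List Int)) : Decidable (Spec_make_cuts frames out) := by unfold Spec_make_cuts; infer_instance

-- ===== CLAIM (what is proved, stated in full; the proofs are below) =====
def Claim_equal_make_cuts : Prop := ∀ (frames : List Bool), Dom_make_cuts frames → Spec_make_cuts frames (make_cuts frames)

-- ===== LEMMAS AND PROOFS =====

-- A's loop body on an already-enumerated (index, value) pair
def mcStepE (st : List (List Int) × Int × Option Bool) (p : Int × Bool) :
    List (List Int) × Int × Option Bool :=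
  match st.2.2 with
  | none => (st.1, p.1, some p.2)
  | some e =>
    let pe := if !e && p.2 then (p.1, p.2) else (st.2.1, e)
    if pe.2 && !p.2 then (st.1 ++ [[pe.1, p.1 - 1]], pe.1, some p.2)
    else (st.1, pe.1, some pe.2)

-- A's epilogue, parameterised by the final index bound
def mcFin (n : Int) (st : List (List Int) × Int × Option Bool) : List (List Int) :=
  match st.2.2 with
  | some e => if e then st.1 ++ [[st.2.1, n - 1]] else st.1
  | none => st.1

-- adjacent pairs of false :: xs ++ [false]
def pairsFrom (prev : Bool) : List Bool → List (Bool × Bool)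
  | [] => [(prev, false)]
  | c :: t => (prev, c) :: pairsFrom c t

-- run starts / run ends of xs, read from index i with previous value prev
def sList (i : Int) (prev : Bool) : List Bool → List Int
  | [] => []
  | c :: t => (if c && !prev then [i] else []) ++ sList (i + 1) c t

def eList (i : Int) (prev : Bool) : List Bool → List Int
  | [] => if prev then [i - 1] else []
  | c :: t => (if prev && !c then [i - 1] else []) ++ eList (i + 1) c t

def pvZipMap (s e : List Int) : List (List Int) := (s.zip e).map (fun p => [p.1, p.2])

theorem pvZipMap_append (s e : List Int) (a b : Int) (h : s.length = e.length) :
    pvZipMap (s ++ [a]) (e ++ [b]) = pvZipMap s e ++ [[a, b]] := by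
  simp [pvZipMap, List.zip_append h]

theorem zip_padded (prev : Bool) (xs : List Bool) :
    (prev :: (xs ++ [false])).zip (xs ++ [false]) = pairsFrom prev xs := by
  induction xs generalizing prev with
  | nil => simp [pairsFrom]
  | cons c t ih => simpa [pairsFrom] using ih c

theorem starts_pairsFrom (xs : List Bool) (prev : Bool) (k : Int) :
    (PySem.List.enumerate (pairsFrom prev xs) k).filterMap
      (fun p => if p.2.2 && !p.2.1 then some p.1 else none) = sList k prev xs := by
  induction xs generalizing prev k with
  | nil => simp [pairsFrom, sList, PySem.List.enumerate_cons, PySem.List.enumerate_nil]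
  | cons c t ih =>
      rw [pairsFrom, PySem.List.enumerate_cons, List.filterMap_cons, ih]
      cases c <;> cases prev <;> simp [sList]

theorem ends_pairsFrom (xs : List Bool) (prev : Bool) (k : Int) :
    (PySem.List.enumerate (pairsFrom prev xs) k).filterMap
      (fun p => if p.2.1 && !p.2.2 then some (p.1 - 1) else none) = eList k prev xs := by
  induction xs generalizing prev k with
  | nil =>
      cases prev <;>
        simp [pairsFrom, eList, PySem.List.enumerate_cons, PySem.List.enumerate_nil]
  | cons c t ih =>
      rw [pairsFrom, PySem.List.enumerate_cons, List.filterMap_cons, ih]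
      cases c <;> cases prev <;> simp [eList]

theorem foldA_enum (xs ys : List Bool) (k : Nat) (st : List (List Int) × Int × Option Bool)
    (h : ys.drop k = xs) :
    (PySem.List.pyRange (k : Int) ((k : Int) + (xs.length : Int)) 1).foldl (mcStep ys) st
      = (PySem.List.enumerate xs (k : Int)).foldl mcStepE st := by
  induction xs generalizing k st with
  | nil =>
      have : ((k : Int) + ((([] : List Bool).length : Int))) = (k : Int) := by simp
      rw [this, PySem.List.pyRange_one_eq_nil le_rfl]
      simp [PySem.List.enumerate_nil]
  | cons c t ih =>
      have hk : (k : Int) < (k : Int) + (((c :: t).length : Int)) := by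
        push_cast [List.length_cons]; omega
      have hget : ys[k]? = some c := by
        rw [← List.head?_drop, h]; rfl
      have hgd : PySem.List.pyGetD ys (k : Int) false = c := by
        simp [PySem.List.pyGetD_natCast, List.getD, hget]
      have hstep : mcStep ys st (k : Int) = mcStepE st ((k : Int), c) := by
        simp [mcStep, mcStepE, hgd]
      have hdrop : ys.drop (k + 1) = t := by
        have h2 := congrArg List.tail h
        simpa [List.tail_drop] using h2
      rw [PySem.List.pyRange_one_cons hk, List.foldl_cons, hstep,
        PySem.List.enumerate_cons, List.foldl_cons]
      have hcast : (PySem.List.pyRange ((k : Int) + 1) ((k : Int) + (((c :: t).length : Int))) 1)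
          = PySem.List.pyRange ((k + 1 : Nat) : Int) (((k + 1 : Nat) : Int) + ((t.length : Int))) 1 := by
        congr 1
        all_goals (push_cast [List.length_cons]; ring)
      rw [hcast]
      have := ih (k + 1) (mcStepE st ((k : Int), c)) hdrop
      simpa [Nat.cast_add] using this

theorem mainA (xs : List Bool) (k place : Int) (prev : Bool) (s e : List Int)
    (cuts : List (List Int))
    (hinv : if prev then ∃ s₀, s = s₀ ++ [place] ∧ s₀.length = e.length ∧ cuts = pvZipMap s₀ e
            else s.length = e.length ∧ cuts = pvZipMap s e) :
    mcFin (k + (xs.length : Int)) ((PySem.List.enumerate xs k).foldl mcStepE (cuts, place, some prev))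
      = pvZipMap (s ++ sList k prev xs) (e ++ eList k prev xs) := by
  induction xs generalizing k place prev s e cuts with
  | nil =>
      cases prev with
      | true =>
          obtain ⟨s₀, hs, hl, hc⟩ := hinv
          simp only [PySem.List.enumerate_nil, List.foldl_nil, mcFin, sList, eList,
            List.length_nil, Nat.cast_zero, add_zero, List.append_nil, hs, hc]
          simpa using (pvZipMap_append s₀ e place (k - 1) hl).symm
      | false =>
          obtain ⟨hl, hc⟩ := hinv
          simp [PySem.List.enumerate_nil, mcFin, sList, eList, hc]
  | cons c t ih =>
      rw [PySem.List.enumerate_cons, List.foldl_cons]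
      have hlen : k + (((c :: t).length : Int)) = (k + 1) + ((t.length : Int)) := by
        push_cast [List.length_cons]; ring
      rw [hlen]
      cases prev with
      | false =>
          obtain ⟨hl, hc⟩ := hinv
          cases c with
          | false =>
              have hst : mcStepE (cuts, place, some false) (k, false)
                  = (cuts, place, some false) := by simp [mcStepE]
              rw [hst, ih (k + 1) place false s e cuts (by exact ⟨hl, hc⟩)]
              simp [sList, eList, pvZipMap]
          | true =>
              have hst : mcStepE (cuts, place, some false) (k, true)
                  = (cuts, k, some true) := by simp [mcStepE]
              rw [hst, ih (k + 1) k true (s ++ [k]) e cuts ⟨s, rfl, hl, hc⟩]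
              simp [sList, eList, pvZipMap]
      | true =>
          obtain ⟨s₀, hs, hl, hc⟩ := hinv
          cases c with
          | true =>
              have hst : mcStepE (cuts, place, some true) (k, true)
                  = (cuts, place, some true) := by simp [mcStepE]
              rw [hst, ih (k + 1) place true s e cuts ⟨s₀, hs, hl, hc⟩]
              simp [sList, eList, pvZipMap]
          | false =>
              have hst : mcStepE (cuts, place, some true) (k, false)
                  = (cuts ++ [[place, k - 1]], place, some false) := by simp [mcStepE]
              have hinv' : (s.length = (e ++ [k - 1]).length ∧
                  cuts ++ [[place, k - 1]] = pvZipMap s (e ++ [k - 1])) := by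
                subst hs hc
                exact ⟨by simp [hl], (pvZipMap_append s₀ e place (k - 1) hl).symm⟩
              rw [hst, ih (k + 1) place false s (e ++ [k - 1]) (cuts ++ [[place, k - 1]]) hinv']
              simp [sList, eList, pvZipMap]

-- ===== VERDICT (by name: the statement is the Claim_ definition above) =====
theorem make_cuts_spec : Claim_equal_make_cuts := by
  intro frames _
  show make_cuts frames = make_cuts_alt frames
  have hB : make_cuts_alt frames
      = pvZipMap (sList 0 false frames) (eList 0 false frames) := by
    simp only [make_cuts_alt]
    rw [PySem.List.slice_from_one]
    have hz : ([false] ++ frames ++ [false]).zip (([false] ++ frames ++ [false]).tail)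
        = pairsFrom false frames := by
      simpa using zip_padded false frames
    rw [hz, starts_pairsFrom, ends_pairsFrom]
    rfl
  rw [hB]
  cases frames with
  | nil => rfl
  | cons c t =>
      have hA : make_cuts (c :: t) = mcFin (((c :: t).length : Int))
          ((PySem.List.pyRange 0 (((c :: t).length : Int)) 1).foldl (mcStep (c :: t))
            ([], 0, none)) := rfl
      have h0 : (PySem.List.pyRange 0 (((c :: t).length : Int)) 1).foldl (mcStep (c :: t))
            ([], 0, none)
          = (PySem.List.enumerate (c :: t) 0).foldl mcStepE ([], 0, none) := by
        simpa using foldA_enum (c :: t) (c :: t) 0 ([], 0, none) (by simp)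
      have hstep0 : mcStepE ([], 0, none) (0, c) = ([], 0, some c) := by
        simp [mcStepE]
      have hlen2 : (((c :: t).length : Int)) = 1 + ((t.length : Int)) := by
        push_cast [List.length_cons]; ring
      rw [hA, h0, PySem.List.enumerate_cons, List.foldl_cons, hstep0, hlen2,
        show (0 : Int) + 1 = 1 from rfl]
      cases c with
      | false =>
          rw [mainA t 1 0 false [] [] [] ⟨rfl, rfl⟩]
          simp [sList, eList]
      | true =>
          rw [mainA t 1 0 true [0] [] [] ⟨[], rfl, rfl, rfl⟩]
          simp [sList, eList]
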